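-- pv_equiv track=rewrite | github.com/logancyang/AlgorithmicThinking | app4/alg_project4_solution.py | build_scoring_matrix
-- ===== SOURCE A (Python) =====
-- def is_dash(letter):
--     """
--     check if the input letter is dash or not
--     """
--
--     if letter == '-':
--         return True
--     else:
--         return False
--
-- def build_scoring_matrix(alphabet, diag_score, off_diag_score, dash_score):
--     """
--     input:
--         a set of characters alphabet and three scores diag_score, off_diag_score,
--         and dash_score.
--     output:
--         a dictionary of dictionaries whose entries are indexed by
--         pairs of characters in alphabet plus '-'. The score for any entry indexed
--         by one or more dashes is dash_score. The score for the remaining diagonal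
--         entries is diag_score. Finally, the score for the remaining off-diagonal
--         entries is off_diag_score
--
--     DONE
--     """
--
--     ## build the matrix M from alphabet, a set of chars
--     my_alphabet = set(alphabet)
--     my_alphabet.add('-')
--     #print type(my_alphabet)
--     scoring_matrix = {}
--     for letter_x in my_alphabet:
--         scoring_matrix[letter_x] = {}
--         for letter_y in my_alphabet:
--             if letter_x == letter_y and not is_dash(letter_x):
--                 scoring_matrix[letter_x][letter_y] = diag_score
--             elif letter_x != letter_y and letter_x != '-' and letter_y != '-':
--                 scoring_matrix[letter_x][letter_y] = off_diag_score
--             elif is_dash(letter_x) != is_dash(letter_y):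
--                 scoring_matrix[letter_x][letter_y] = dash_score
--             else:
--                 scoring_matrix[letter_x][letter_y] = dash_score
--
--     return scoring_matrix
-- ===== SOURCE B (Python) =====
-- def build_scoring_matrix(alphabet, diag_score, off_diag_score, dash_score):
--     """Grow the matrix incrementally: start empty and, for each fresh letter
--     (dash last), border the current square matrix with one new column and one
--     new row, instead of populating every cell with a nested loop."""
--     matrix = {}
--     for letter in list(alphabet) + ['-']:
--         if letter in matrix:
--             continue
--         col_score = dash_score if letter == '-' else off_diag_score
--         for x, row in matrix.items():
--             row[letter] = dash_score if x == '-' else col_score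
--         new_row = {y: (dash_score if (letter == '-' or y == '-') else off_diag_score)
--                    for y in matrix}
--         new_row[letter] = dash_score if letter == '-' else diag_score
--         matrix[letter] = new_row
--     return matrix
-- ===== Notes on version B (the rewrite author's own statement) =====
-- stated objective: alternative
-- what changed: Replaces A's nested double loop with a per-cell four-way branch chain by an incremental construction that starts from an empty matrix and, for each fresh letter (dash appended last), borders the current square matrix with one new column and one new row.
import Mathlib
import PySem

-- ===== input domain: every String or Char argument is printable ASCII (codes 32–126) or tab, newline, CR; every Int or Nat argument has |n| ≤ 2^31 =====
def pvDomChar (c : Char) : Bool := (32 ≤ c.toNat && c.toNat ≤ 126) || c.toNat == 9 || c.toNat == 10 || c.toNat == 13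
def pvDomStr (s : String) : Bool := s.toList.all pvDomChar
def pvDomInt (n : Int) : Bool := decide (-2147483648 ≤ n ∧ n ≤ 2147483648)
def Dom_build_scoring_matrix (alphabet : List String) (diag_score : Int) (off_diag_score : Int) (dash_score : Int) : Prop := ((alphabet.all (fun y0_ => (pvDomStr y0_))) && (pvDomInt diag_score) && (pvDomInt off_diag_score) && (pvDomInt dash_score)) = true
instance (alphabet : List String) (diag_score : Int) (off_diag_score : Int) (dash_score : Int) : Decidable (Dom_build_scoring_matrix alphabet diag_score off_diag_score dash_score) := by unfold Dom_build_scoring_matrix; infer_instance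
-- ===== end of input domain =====

-- B builds the matrix incrementally, bordering the current square matrix with one
-- new column and one new row per fresh letter, instead of A's nested loop with a
-- per-cell branch chain (objective: alternative).  Python A iterates over a hash
-- set, B in first-occurrence order; the dict outputs are equal as key-value maps
-- (dicts are compared ignoring order), and both Lean ports traverse
-- first-occurrence order.

-- ===== PORT A =====
def is_dash (letter : String) : Bool :=
  if letter == "-" then true else false

def build_scoring_matrix (alphabet : List String) (diag_score : Int) (off_diag_score : Int) (dash_score : Int) : List (String × List (String × Int)) :=
  let my_alphabet := PySem.Set.add (PySem.Set.ofList alphabet) "-"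
  my_alphabet.foldl (fun scoring_matrix letter_x =>
    let row := my_alphabet.foldl (fun row letter_y =>
      if letter_x == letter_y && !(is_dash letter_x) then
        row ++ [(letter_y, diag_score)]
      else if letter_x != letter_y && letter_x != "-" && letter_y != "-" then
        row ++ [(letter_y, off_diag_score)]
      else if is_dash letter_x != is_dash letter_y then
        row ++ [(letter_y, dash_score)]
      else
        row ++ [(letter_y, dash_score)]) []
    scoring_matrix ++ [(letter_x, row)]) []

-- ===== PORT B =====
-- dict assignment d[k] = v on an association list: overwrite the first match in place,
-- append if the key is absent (exact Python dict semantics for one assignment)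
def setKey : List (String × Int) → String → Int → List (String × Int)
  | [], key, val => [(key, val)]
  | (k, v) :: rest, key, val =>
    if k == key then (k, val) :: rest else (k, v) :: setKey rest key val

def build_scoring_matrix_alt (alphabet : List String) (diag_score : Int) (off_diag_score : Int) (dash_score : Int) : List (String × List (String × Int)) :=
  (alphabet ++ ["-"]).foldl (fun matrix letter =>
    if matrix.any (fun p => p.1 == letter) then matrix
    else
      let col_score := if letter == "-" then dash_score else off_diag_score
      let extended := matrix.map (fun p =>
        (p.1, setKey p.2 letter (if p.1 == "-" then dash_score else col_score)))
      let new_row := matrix.map (fun p =>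
        (p.1, if letter == "-" || p.1 == "-" then dash_score else off_diag_score))
      let new_row := setKey new_row letter (if letter == "-" then dash_score else diag_score)
      extended ++ [(letter, new_row)]) []

-- ===== PRECONDITION & SPEC =====
def Spec_build_scoring_matrix (alphabet : List String) (diag_score : Int) (off_diag_score : Int) (dash_score : Int) (out : List (String × List (String × Int))) : Prop := out = build_scoring_matrix_alt alphabet diag_score off_diag_score dash_score
instance (alphabet : List String) (diag_score : Int) (off_diag_score : Int) (dash_score : Int) (out : List (String × List (String × Int))) : Decidable (Spec_build_scoring_matrix alphabet diag_score off_diag_score dash_score out) := by unfold Spec_build_scoring_matrix; infer_instance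

-- ===== CLAIM =====
def Claim_equal_build_scoring_matrix : Prop := ∀ (alphabet : List String) (diag_score : Int) (off_diag_score : Int) (dash_score : Int), Dom_build_scoring_matrix alphabet diag_score off_diag_score dash_score → Spec_build_scoring_matrix alphabet diag_score off_diag_score dash_score (build_scoring_matrix alphabet diag_score off_diag_score dash_score)

-- ===== LEMMAS AND PROOFS =====

-- the score of one cell, as both programs compute it
def cell (diag off dash : Int) (x y : String) : Int :=
  if x = "-" ∨ y = "-" then dash else if x = y then diag else off

-- the full matrix over a key list D
def fmat (diag off dash : Int) (D : List String) : List (String × List (String × Int)) :=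
  D.map (fun x => (x, D.map (fun y => (y, cell diag off dash x y))))

-- a fold that appends one keyed entry per element is a map
theorem foldl_append_map {α β : Type} (g : α → β) :
    ∀ (L : List α) (acc : List (α × β)),
      L.foldl (fun r y => r ++ [(y, g y)]) acc = acc ++ L.map (fun y => (y, g y))
  | [], acc => by simp
  | y :: t, acc => by
    simp [List.foldl_cons, foldl_append_map g t]

-- A's inner loop computes the row of cell scores
theorem rowA_eq (diag off dash : Int) (x : String) (L : List String) :
    L.foldl (fun row letter_y =>
      if x == letter_y && !(is_dash x) then row ++ [(letter_y, diag)]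
      else if x != letter_y && x != "-" && letter_y != "-" then row ++ [(letter_y, off)]
      else if is_dash x != is_dash letter_y then row ++ [(letter_y, dash)]
      else row ++ [(letter_y, dash)]) []
      = L.map (fun y => (y, cell diag off dash x y)) := by
  have hstep : ∀ (row : List (String × Int)) (y : String),
      (if x == y && !(is_dash x) then row ++ [(y, diag)]
       else if x != y && x != "-" && y != "-" then row ++ [(y, off)]
       else if is_dash x != is_dash y then row ++ [(y, dash)]
       else row ++ [(y, dash)]) = row ++ [(y, cell diag off dash x y)] := by
    intro row y
    simp only [cell, is_dash]
    by_cases hxy : x = y <;> by_cases hxd : x = "-" <;> by_cases hyd : y = "-" <;>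
      simp_all
  calc L.foldl (fun row letter_y =>
      if x == letter_y && !(is_dash x) then row ++ [(letter_y, diag)]
      else if x != letter_y && x != "-" && letter_y != "-" then row ++ [(letter_y, off)]
      else if is_dash x != is_dash letter_y then row ++ [(letter_y, dash)]
      else row ++ [(letter_y, dash)]) []
      = L.foldl (fun row y => row ++ [(y, cell diag off dash x y)]) [] := by
        exact PySem.List.foldl_congr_mem L _ _ [] (fun row y _ => hstep row y)
    _ = L.map (fun y => (y, cell diag off dash x y)) := by
        simpa using foldl_append_map (cell diag off dash x) L []

-- A's outer loop builds fmat over its key list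
theorem A_eq_fmat (diag off dash : Int) (L : List String) :
    L.foldl (fun scoring_matrix letter_x =>
      let row := L.foldl (fun row letter_y =>
        if letter_x == letter_y && !(is_dash letter_x) then row ++ [(letter_y, diag)]
        else if letter_x != letter_y && letter_x != "-" && letter_y != "-" then row ++ [(letter_y, off)]
        else if is_dash letter_x != is_dash letter_y then row ++ [(letter_y, dash)]
        else row ++ [(letter_y, dash)]) []
      scoring_matrix ++ [(letter_x, row)]) []
      = fmat diag off dash L := by
  have : ∀ (M : List String) (acc : List (String × List (String × Int))),
      M.foldl (fun scoring_matrix letter_x =>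
        let row := L.foldl (fun row letter_y =>
          if letter_x == letter_y && !(is_dash letter_x) then row ++ [(letter_y, diag)]
          else if letter_x != letter_y && letter_x != "-" && letter_y != "-" then row ++ [(letter_y, off)]
          else if is_dash letter_x != is_dash letter_y then row ++ [(letter_y, dash)]
          else row ++ [(letter_y, dash)]) []
        scoring_matrix ++ [(letter_x, row)]) acc
      = acc ++ M.map (fun x => (x, L.map (fun y => (y, cell diag off dash x y)))) := by
    intro M
    induction M with
    | nil => intro acc; simp
    | cons h t ih =>
      intro acc
      simp only [List.foldl_cons, List.map_cons]
      rw [rowA_eq, ih]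
      simp
  simpa [fmat] using this L []

-- setKey on a map-shaped row with an absent key appends
theorem setKey_map_absent (g : String → Int) (l : String) (v : Int) (D : List String)
    (hl : l ∉ D) :
    setKey (D.map (fun y => (y, g y))) l v = D.map (fun y => (y, g y)) ++ [(l, v)] := by
  induction D with
  | nil => simp [setKey]
  | cons h t ih =>
    have hh : h ≠ l := fun e => hl (e ▸ List.mem_cons_self ..)
    simp only [List.map_cons, setKey, beq_eq_false_iff_ne.mpr hh, Bool.false_eq_true,
      if_false, List.cons_append]
    rw [ih (fun m => hl (List.mem_cons_of_mem _ m))]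

-- B's fold grows fmat by one border row and column per fresh letter
theorem B_fold (diag off dash : Int) :
    ∀ (M D : List String),
      M.foldl (fun matrix letter =>
        if matrix.any (fun p => p.1 == letter) then matrix
        else
          let col_score := if letter == "-" then dash else off
          let extended := matrix.map (fun p =>
            (p.1, setKey p.2 letter (if p.1 == "-" then dash else col_score)))
          let new_row := matrix.map (fun p =>
            (p.1, if letter == "-" || p.1 == "-" then dash else off))
          let new_row := setKey new_row letter (if letter == "-" then dash else diag)
          extended ++ [(letter, new_row)]) (fmat diag off dash D)
      = fmat diag off dash (M.foldl PySem.Set.add D)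
  | [], D => by simp
  | l :: t, D => by
    have hany : ((fmat diag off dash D).any (fun p => p.1 == l)) = decide (l ∈ D) := by
      simp [fmat, List.any_map, Function.comp_def, List.any_beq']
    simp only [List.foldl_cons]
    by_cases hl : l ∈ D
    · have hadd : PySem.Set.add D l = D := by
        simp [PySem.Set.add, PySem.Set.contains, hl]
      rw [hany]
      simp only [hl, decide_true, if_true, hadd]
      exact B_fold diag off dash t D
    · have hadd : PySem.Set.add D l = D ++ [l] := by
        simp [PySem.Set.add, PySem.Set.contains, hl]
      rw [hany]
      simp only [hl, decide_false, Bool.false_eq_true, if_false, hadd]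
      have hext : (fmat diag off dash D).map (fun p =>
          (p.1, setKey p.2 l (if p.1 == "-" then dash else if l == "-" then dash else off)))
          = D.map (fun x => (x, D.map (fun y => (y, cell diag off dash x y)) ++ [(l, cell diag off dash x l)])) := by
        simp only [fmat, List.map_map]
        refine List.map_congr_left fun x hx => ?_
        simp only [Function.comp]
        rw [setKey_map_absent _ _ _ _ hl]
        have hxl : x ≠ l := fun e => hl (e ▸ hx)
        have : (if x == "-" then dash else if l == "-" then dash else off)
            = cell diag off dash x l := by
          simp only [cell]
          by_cases hx' : x = "-" <;> by_cases hl' : l = "-" <;> simp_all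
        rw [this]
      have hrowmap : (fmat diag off dash D).map (fun p =>
          (p.1, if l == "-" || p.1 == "-" then dash else off))
          = D.map (fun y => (y, cell diag off dash l y)) := by
        simp only [fmat, List.map_map]
        refine List.map_congr_left fun y hy => ?_
        simp only [Function.comp]
        have hyl : l ≠ y := fun e => hl (e ▸ hy)
        have : (if l == "-" || y == "-" then dash else off) = cell diag off dash l y := by
          simp only [cell]
          by_cases hl' : l = "-" <;> by_cases hy' : y = "-" <;> simp_all
        rw [this]
      have hnew : setKey (D.map (fun y => (y, cell diag off dash l y))) l
            (if l == "-" then dash else diag)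
          = D.map (fun y => (y, cell diag off dash l y)) ++ [(l, cell diag off dash l l)] := by
        rw [setKey_map_absent _ _ _ _ hl]
        have : (if l == "-" then dash else diag) = cell diag off dash l l := by
          simp only [cell]
          by_cases hl' : l = "-" <;> simp_all
        rw [this]
      have hsq : fmat diag off dash (D ++ [l])
          = D.map (fun x => (x, D.map (fun y => (y, cell diag off dash x y)) ++ [(l, cell diag off dash x l)]))
            ++ [(l, D.map (fun y => (y, cell diag off dash l y)) ++ [(l, cell diag off dash l l)])] := by
        simp [fmat, List.map_append]
      rw [hext, hrowmap, hnew, ← hsq]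
      exact B_fold diag off dash t (D ++ [l])

-- ===== VERDICT (by name: the statement is the Claim_ definition above) =====
theorem build_scoring_matrix_spec : Claim_equal_build_scoring_matrix := by
  intro alphabet diag off dash _
  unfold Spec_build_scoring_matrix
  dsimp only [build_scoring_matrix, build_scoring_matrix_alt]
  rw [A_eq_fmat]
  have := B_fold diag off dash (alphabet ++ ["-"]) []
  rw [show fmat diag off dash ([] : List String) = [] from rfl] at this
  rw [this, List.foldl_append]
  simp only [List.foldl_cons, List.foldl_nil]
  rw [show (alphabet.foldl PySem.Set.add []) = PySem.Set.ofList alphabet from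
    (PySem.Set.ofList_eq_foldl alphabet).symm]
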